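-- pv_equiv track=rewrite | github.com/jjtdeveloper/Choir-standing-chart-organizer | main.py | separateSections
-- ===== SOURCE A (Python) =====
-- def separateSections(choir):
--     sections = []
--     splitSections = []
--     for person in choir:
--         try:
--             section = sections.index(person[1]) # Checks if a persons section exists already
--             sectionExists = True
--         except ValueError:
--             sectionExists = False
--             sections.append(person[1])
--
--         if sectionExists:
--             splitSections[section].append(person) # If this person belongs to a section append them to that section
--         else:
--             splitSections.append([person])
--
--     return splitSections
-- ===== SOURCE B (Python) =====
-- def separateSections(choir):
--     order = []
--     for person in choir:
--         s = person[1]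
--         if s not in order:
--             order.append(s)
--     return [[p for p in choir if p[1] == s] for s in order]
-- ===== Notes on version B (the rewrite author's own statement) =====
-- stated objective: simpler
-- what changed: A builds all groups in one incremental pass, appending into the group found via list.index; B first collects the distinct section keys in first-appearance order, then builds each group by filtering the whole choir per key.
import Mathlib
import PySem

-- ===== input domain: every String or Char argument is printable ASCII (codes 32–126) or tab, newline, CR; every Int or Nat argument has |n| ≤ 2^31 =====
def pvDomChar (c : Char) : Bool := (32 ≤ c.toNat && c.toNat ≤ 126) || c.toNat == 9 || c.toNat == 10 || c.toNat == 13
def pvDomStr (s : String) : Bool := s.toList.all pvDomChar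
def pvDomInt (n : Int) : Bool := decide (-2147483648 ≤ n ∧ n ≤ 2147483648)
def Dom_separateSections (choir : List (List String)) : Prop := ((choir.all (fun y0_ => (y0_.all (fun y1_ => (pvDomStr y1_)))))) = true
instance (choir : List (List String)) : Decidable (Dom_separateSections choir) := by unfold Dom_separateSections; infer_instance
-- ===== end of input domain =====

-- B replaces A's single incremental grouping pass by an index-first structure: one pass collecting
-- the distinct section keys, then one filter pass over the whole choir per key (simpler, same cost).

-- ===== PORT A =====
-- one step of A's loop: look the section up in `sections`; append into the found group or open a new one
def sepStepA (st : List String × List (List (List String))) (person : List String) :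
    List String × List (List (List String)) :=
  let sec := (PySem.List.pyGet? person 1).getD ""   -- person[1]; under Pre_ the index is in range
  match PySem.List.index? st.1 sec with
  | some i => (st.1, st.2.modify i (· ++ [person]))
  | none   => (st.1 ++ [sec], st.2 ++ [[person]])

def separateSections (choir : List (List String)) : List (List (List String)) :=
  (choir.foldl sepStepA ([], [])).2

-- ===== PORT B =====
def separateSections_alt (choir : List (List String)) : List (List (List String)) :=
  let order := choir.foldl
    (fun acc p =>
      let s := (PySem.List.pyGet? p 1).getD ""
      if acc.contains s then acc else acc ++ [s]) []
  order.map (fun s => choir.filter (fun p => (PySem.List.pyGet? p 1).getD "" == s))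

-- ===== PRECONDITION & SPEC =====
-- excludes exactly the inputs where person[1] raises IndexError (a person with fewer than 2 entries)
def Pre_separateSections (choir : List (List String)) : Prop :=
  ∀ p ∈ choir, 2 ≤ p.length
instance (choir : List (List String)) : Decidable (Pre_separateSections choir) := by
  unfold Pre_separateSections; infer_instance
def pvWitness_separateSections : List (List String) :=
  [["Al", "Sop"], ["Bo", "Alto"], ["Cy", "Sop"]]

def Spec_separateSections (choir : List (List String)) (out : List (List (List String))) : Prop := out = separateSections_alt choir
instance (choir : List (List String)) (out : List (List (List String))) : Decidable (Spec_separateSections choir out) := by unfold Spec_separateSections; infer_instance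

-- ===== CLAIM (what is proved, stated in full; the proofs are below) =====
def Claim_equal_separateSections : Prop := ∀ (choir : List (List String)), Dom_separateSections choir → Pre_separateSections choir → Spec_separateSections choir (separateSections choir)

-- ===== LEMMAS AND PROOFS =====

-- the section key of a person, as both ports compute it
def pkey (p : List String) : String := (PySem.List.pyGet? p 1).getD ""

-- B's first pass, as a function of the processed prefix
def ordStep (acc : List String) (p : List String) : List String :=
  if acc.contains (pkey p) then acc else acc ++ [pkey p]

def ord (l : List (List String)) : List String := l.foldl ordStep []

lemma ordStep_mem {acc : List String} {p : List String} (h : pkey p ∈ acc) :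
    ordStep acc p = acc := by
  unfold ordStep; rw [if_pos (List.contains_iff_mem.mpr h)]

lemma ordStep_not_mem {acc : List String} {p : List String} (h : pkey p ∉ acc) :
    ordStep acc p = acc ++ [pkey p] := by
  unfold ordStep
  rw [if_neg (fun hc => h (List.contains_iff_mem.mp hc))]

lemma mem_foldl_ordStep (l : List (List String)) :
    ∀ (acc : List String) (s : String),
      s ∈ l.foldl ordStep acc ↔ s ∈ acc ∨ ∃ q ∈ l, pkey q = s := by
  induction l with
  | nil => intro acc s; simp
  | cons p l ih =>
    intro acc s
    rw [List.foldl_cons, ih]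
    have hcons : (∃ q ∈ p :: l, pkey q = s) ↔ pkey p = s ∨ ∃ q ∈ l, pkey q = s := by
      simp
    rw [hcons]
    by_cases h : pkey p ∈ acc
    · rw [ordStep_mem h]
      constructor
      · rintro (hs | hq)
        · exact Or.inl hs
        · exact Or.inr (Or.inr hq)
      · rintro (hs | hk | hq)
        · exact Or.inl hs
        · exact Or.inl (hk ▸ h)
        · exact Or.inr hq
    · rw [ordStep_not_mem h]
      simp only [List.mem_append, List.mem_singleton]
      constructor
      · rintro ((hs | hs) | hq)
        · exact Or.inl hs
        · exact Or.inr (Or.inl hs.symm)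
        · exact Or.inr (Or.inr hq)
      · rintro (hs | hk | hq)
        · exact Or.inl (Or.inl hs)
        · exact Or.inl (Or.inr hk.symm)
        · exact Or.inr hq

lemma mem_ord (l : List (List String)) (s : String) :
    s ∈ ord l ↔ ∃ q ∈ l, pkey q = s := by
  unfold ord; rw [mem_foldl_ordStep]; simp

lemma nodup_foldl_ordStep (l : List (List String)) :
    ∀ (acc : List String), acc.Nodup → (l.foldl ordStep acc).Nodup := by
  induction l with
  | nil => intro acc h; exact h
  | cons p l ih =>
    intro acc h
    rw [List.foldl_cons]
    apply ih
    by_cases hm : pkey p ∈ acc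
    · rw [ordStep_mem hm]; exact h
    · rw [ordStep_not_mem hm]
      rw [List.nodup_append]
      refine ⟨h, List.nodup_singleton _, ?_⟩
      intro a ha b hb he
      exact hm ((he.symm ▸ List.mem_singleton.mp hb) ▸ ha)

lemma nodup_ord (l : List (List String)) : (ord l).Nodup :=
  nodup_foldl_ordStep l [] List.nodup_nil

lemma ord_append_singleton (l : List (List String)) (p : List String) :
    ord (l ++ [p]) = ordStep (ord l) p := by
  unfold ord
  rw [List.foldl_append]
  rfl

lemma modify_cons_zero {α : Type} (a : α) (l : List α) (f : α → α) :
    (a :: l).modify 0 f = f a :: l := by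
  simp [List.modify, List.modifyTailIdx, List.modifyTailIdx.go, List.modifyHead]

lemma modify_cons_succ {α : Type} (a : α) (l : List α) (i : Nat) (f : α → α) :
    (a :: l).modify (i + 1) f = a :: l.modify i f := by
  simp [List.modify, List.modifyTailIdx, List.modifyTailIdx.go]

-- modifying the i-th entry of a map over a Nodup list = mapping with an if on the key
lemma map_modify_index (s : String)
    (f : String → List (List String)) (g : List (List String) → List (List String)) :
    ∀ (secs : List String) (i : Nat), secs.Nodup → PySem.List.index? secs s = some i →
      (secs.map f).modify i g = secs.map (fun t => if t = s then g (f t) else f t) := by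
  intro secs
  induction secs with
  | nil => intro i _ h; simp [PySem.List.index?] at h
  | cons t rest ih =>
    intro i hnd h
    by_cases hts : t = s
    · subst hts
      rw [PySem.List.index?_cons_self] at h
      cases h
      have hnm : t ∉ rest := (List.nodup_cons.mp hnd).1
      rw [List.map_cons, modify_cons_zero, List.map_cons, if_pos rfl]
      congr 1
      apply List.map_congr_left
      intro x hx
      rw [if_neg]
      intro hxe; exact hnm (hxe ▸ hx)
    · rw [PySem.List.index?_cons_of_ne rest hts] at h
      rcases Option.map_eq_some_iff.mp h with ⟨j, hj, rfl⟩
      rw [List.map_cons, modify_cons_succ, List.map_cons, if_neg hts]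
      congr 1
      exact ih j (List.nodup_cons.mp hnd).2 hj

-- the groups A maintains after processing `done`, expressed as B would build them
def groupsOf (done : List (List String)) : List (List (List String)) :=
  (ord done).map (fun s => done.filter (fun p => pkey p == s))

lemma stepA_state (done : List (List String)) (p : List String) :
    sepStepA (ord done, groupsOf done) p = (ord (done ++ [p]), groupsOf (done ++ [p])) := by
  unfold sepStepA groupsOf
  simp only []
  have hkey : (PySem.List.pyGet? p 1).getD "" = pkey p := rfl
  rw [hkey, ord_append_singleton]
  cases hidx : PySem.List.index? (ord done) (pkey p) with
  | none =>
    dsimp only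
    have hnm : pkey p ∉ ord done := (PySem.List.index?_eq_none_iff (ord done) (pkey p)).mp hidx
    rw [ordStep_not_mem hnm]
    congr 1
    rw [List.map_append, List.map_singleton]
    congr 1
    · apply List.map_congr_left
      intro t ht
      have hts : t ≠ pkey p := fun he => hnm (he ▸ ht)
      rw [List.filter_append]
      have h1 : List.filter (fun q => pkey q == t) [p] = [] := by
        simp only [List.filter_cons, List.filter_nil]
        rw [if_neg]
        simp only [beq_iff_eq]
        exact fun he => hts he.symm
      rw [h1, List.append_nil]
    · have hdone : List.filter (fun q => pkey q == pkey p) done = [] := by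
        rw [List.filter_eq_nil_iff]
        intro q hq hbe
        exact hnm ((mem_ord done (pkey p)).mpr ⟨q, hq, by simpa using hbe⟩)
      rw [List.filter_append, hdone, List.nil_append]
      simp
  | some i =>
    dsimp only
    have hm : pkey p ∈ ord done := by
      have := (PySem.List.index?_isSome_iff (ord done) (pkey p))
      rw [hidx] at this
      exact this.mp rfl
    rw [ordStep_mem hm]
    congr 1
    rw [map_modify_index (pkey p) _ _ (ord done) i (nodup_ord done) hidx]
    apply List.map_congr_left
    intro t ht
    rw [List.filter_append]
    by_cases hts : t = pkey p
    · subst hts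
      rw [if_pos rfl]
      congr 1
      simp
    · rw [if_neg hts]
      have h1 : List.filter (fun q => pkey q == t) [p] = [] := by
        simp only [List.filter_cons, List.filter_nil]
        rw [if_neg]
        simp only [beq_iff_eq]
        exact fun he => hts he.symm
      rw [h1, List.append_nil]

lemma loopA (rest : List (List String)) :
    ∀ (done : List (List String)),
      rest.foldl sepStepA (ord done, groupsOf done)
        = (ord (done ++ rest), groupsOf (done ++ rest)) := by
  induction rest with
  | nil => intro done; simp
  | cons p rest ih =>
    intro done
    rw [List.foldl_cons, stepA_state, ih (done ++ [p]), List.append_assoc]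
    rfl

lemma alt_eq_groupsOf (choir : List (List String)) :
    separateSections_alt choir = groupsOf choir := rfl

-- ===== VERDICT (by name: the statement is the Claim_ definition above) =====
theorem separateSections_spec : Claim_equal_separateSections := by
  intro choir _ _
  unfold Spec_separateSections separateSections
  have h0 : (([], []) : List String × List (List (List String))) = (ord [], groupsOf []) := rfl
  rw [h0, loopA choir [], List.nil_append, alt_eq_groupsOf]
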